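-- pv_equiv track=rewrite | github.com/selfreferencing/erdos-86-lean | phase1_type_resistance.py | check_type_ii
-- ===== SOURCE A (Python) =====
-- import math
-- from typing import List, Tuple, Optional, Dict, Set
--
-- def get_divisors(n: int) -> List[int]:
--     """Get all divisors of n."""
--     divisors = []
--     for i in range(1, int(math.isqrt(n)) + 1):
--         if n % i == 0:
--             divisors.append(i)
--             if i != n // i:
--                 divisors.append(n // i)
--     return sorted(divisors)
--
-- def check_type_ii(p: int, x: int) -> Optional[int]:
--     """
--     Check if Type II solution exists for given p, x.
--     Returns witnessing divisor d if found, None otherwise.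
--
--     Type II condition: d | x², d ≤ x, and d ≡ -x (mod m) where m = 4x - p
--     """
--     m = 4 * x - p
--     if m <= 0:
--         return None
--
--     target = (-x) % m
--     x_squared = x * x
--
--     for d in get_divisors(x_squared):
--         if d <= x and d % m == target:
--             return d
--     return None
-- ===== SOURCE B (Python) =====
-- def check_type_ii(p, x):
--     """Smallest d with d | x*x, d <= x, d % m == (-x) % m, m = 4x - p.
--
--     Instead of enumerating all divisors of x*x, walk the arithmetic
--     progression of candidates d ≡ -x (mod m) upward and test divisibility:
--     the first hit is the smallest qualifying divisor.
--     """
--     m = 4 * x - p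
--     if m <= 0:
--         return None
--     target = (-x) % m
--     x_squared = x * x
--     d = target if target >= 1 else target + m
--     while d <= x:
--         if x_squared % d == 0:
--             return d
--         d += m
--     return None
-- ===== Notes on version B (the rewrite author's own statement) =====
-- stated objective: faster
-- what changed: Instead of enumerating and sorting all divisors of x^2 and scanning them, B walks the arithmetic progression of residues d = target, target+m, ... up to x and returns the first d dividing x^2.
import Mathlib
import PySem

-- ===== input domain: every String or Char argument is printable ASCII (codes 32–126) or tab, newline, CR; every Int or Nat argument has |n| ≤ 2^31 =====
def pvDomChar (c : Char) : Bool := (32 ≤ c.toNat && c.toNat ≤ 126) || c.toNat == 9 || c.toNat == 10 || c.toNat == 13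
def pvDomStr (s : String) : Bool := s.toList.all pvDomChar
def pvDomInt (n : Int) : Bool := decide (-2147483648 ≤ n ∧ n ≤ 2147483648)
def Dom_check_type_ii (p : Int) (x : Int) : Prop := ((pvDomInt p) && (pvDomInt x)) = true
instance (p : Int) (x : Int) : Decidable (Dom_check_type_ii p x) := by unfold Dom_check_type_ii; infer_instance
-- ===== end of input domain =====

-- B replaces A's enumerate-then-sort-then-scan over all divisors of x² by a walk
-- over the arithmetic progression d ≡ -x (mod m), d ≤ x, returning the first d dividing x².

-- ===== PORT A =====
-- math.isqrt(n) for n ≥ 0 is exactly Nat.sqrt n.toNat (A only calls it on x*x ≥ 0)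
def get_divisors (n : Int) : List Int :=
  let s : Int := (Nat.sqrt n.toNat : Int)
  let divisors := (PySem.List.pyRange 1 (s + 1) 1).foldl (fun acc i =>
    if PySem.Int.mod n i == 0 then
      let acc1 := acc ++ [i]
      if i != PySem.Int.floordiv n i then acc1 ++ [PySem.Int.floordiv n i] else acc1
    else acc) []
  PySem.List.sorted divisors (fun d => d) false

def check_type_ii (p : Int) (x : Int) : Option Int :=
  let m := 4 * x - p
  if m ≤ 0 then none
  else
    let target := PySem.Int.mod (-x) m
    let x_squared := x * x
    (get_divisors x_squared).find? (fun d => decide (d ≤ x) && (PySem.Int.mod d m == target))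

-- ===== PORT B =====
-- the 'while d <= x' loop of Source B; the '0 < m' test only makes the recursion total
def altLoop (x_squared m x d : Int) : Option Int :=
  if _hm : 0 < m then
    if _hd : d ≤ x then
      if PySem.Int.mod x_squared d == 0 then some d
      else altLoop x_squared m x (d + m)
    else none
  else none
termination_by (x + 1 - d).toNat
decreasing_by omega

def check_type_ii_alt (p : Int) (x : Int) : Option Int :=
  let m := 4 * x - p
  if m ≤ 0 then none
  else
    let target := PySem.Int.mod (-x) m
    let x_squared := x * x
    altLoop x_squared m x (if 1 ≤ target then target else target + m)

-- ===== PRECONDITION & SPEC =====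
def Spec_check_type_ii (p : Int) (x : Int) (out : Option Int) : Prop := out = check_type_ii_alt p x
instance (p : Int) (x : Int) (out : Option Int) : Decidable (Spec_check_type_ii p x out) := by unfold Spec_check_type_ii; infer_instance

-- ===== CLAIM (what is proved, stated in full; the proofs are below) =====
def Claim_equal_check_type_ii : Prop := ∀ (p : Int) (x : Int), Dom_check_type_ii p x → Spec_check_type_ii p x (check_type_ii p x)

-- ===== LEMMAS AND PROOFS =====

-- A's divisor list is weakly increasing (it is sorted(...)).
theorem pv_get_divisors_pairwise (n : Int) : (get_divisors n).Pairwise (· ≤ ·) := by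
  unfold get_divisors
  exact PySem.List.sorted_pairwise _ _

-- A's divisor list holds exactly the positive divisors of n (n ≥ 1).
theorem pv_mem_get_divisors {n : Int} (hn : 1 ≤ n) (d : Int) :
    d ∈ get_divisors n ↔ (1 ≤ d ∧ d ∣ n) := by
  unfold get_divisors
  rw [PySem.List.mem_sorted]
  rw [show (fun acc i =>
      if PySem.Int.mod n i == 0 then
        let acc1 := acc ++ [i]
        if i != PySem.Int.floordiv n i then acc1 ++ [PySem.Int.floordiv n i] else acc1
      else acc)
    = (fun (acc : List Int) i => acc ++
        (if PySem.Int.mod n i == 0 then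
          (if i != PySem.Int.floordiv n i then [i, PySem.Int.floordiv n i] else [i])
         else [])) from by
      funext acc i; split_ifs <;> simp]
  rw [PySem.List.foldl_append_eq_flatMap]
  simp only [List.nil_append, List.mem_flatMap, PySem.List.mem_pyRange_one]
  constructor
  · rintro ⟨i, ⟨hi1, hi2⟩, hd⟩
    by_cases hz : PySem.Int.mod n i == 0
    · have hidvd : i ∣ n := (PySem.Int.mod_eq_zero_iff_dvd n i).mp (by simpa using hz)
      have hfd : PySem.Int.floordiv n i = n / i := PySem.Int.floordiv_eq_ediv_of_pos (by omega)
      simp only [hz, if_true] at hd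
      have hq1 : 1 ≤ n / i := by
        rw [Int.le_ediv_iff_mul_le (by omega)]
        have := Int.le_of_dvd (by omega) hidvd
        omega
      have hqdvd : n / i ∣ n := Int.ediv_dvd_of_dvd hidvd
      split_ifs at hd <;> simp [hfd] at hd
      · rcases hd with hd | hd <;> subst hd
        · exact ⟨by omega, hidvd⟩
        · exact ⟨hq1, hqdvd⟩
      · subst hd; exact ⟨by omega, hidvd⟩
    · simp [hz] at hd
  · rintro ⟨hd1, hddvd⟩
    have hs0 : (0:Int) ≤ (Nat.sqrt n.toNat : Int) := by positivity
    have hcast : ((n.toNat : Int)) = n := by omega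
    have hs1 : (Nat.sqrt n.toNat : Int) * (Nat.sqrt n.toNat : Int) ≤ n := by
      have h := Nat.sqrt_le n.toNat
      zify at h
      omega
    have hs2 : n < ((Nat.sqrt n.toNat : Int) + 1) * ((Nat.sqrt n.toNat : Int) + 1) := by
      have h := Nat.lt_succ_sqrt n.toNat
      zify at h
      omega
    set s : Int := (Nat.sqrt n.toNat : Int) with hsdef
    have hdn : d ≤ n := Int.le_of_dvd (by omega) hddvd
    by_cases hds : d ≤ s
    · -- witness i = d
      refine ⟨d, ⟨by omega, by omega⟩, ?_⟩
      have hz : (PySem.Int.mod n d == 0) = true := by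
        simp [beq_iff_eq, PySem.Int.mod_eq_zero_iff_dvd]; exact hddvd
      simp only [hz, if_true]
      split_ifs <;> simp
    · -- witness i = n / d
      have hq1 : 1 ≤ n / d := by
        rw [Int.le_ediv_iff_mul_le (by omega)]
        omega
      have hqdvd : n / d ∣ n := Int.ediv_dvd_of_dvd hddvd
      have hmul : n / d * d = n := Int.ediv_mul_cancel hddvd
      have hqs : n / d ≤ s := by
        by_contra hqs
        have h1 : s + 1 ≤ n / d := by omega
        have h2 : s + 1 ≤ d := by omega
        have : (s + 1) * (s + 1) ≤ (n / d) * d :=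
          mul_le_mul h1 h2 (by omega) (by omega)
        omega
      have hback : n / (n / d) = d := by
        obtain ⟨k, hk⟩ := hddvd
        have hk1 : 1 ≤ k := by nlinarith
        subst hk
        rw [Int.mul_ediv_cancel_left k (by omega), Int.mul_ediv_cancel _ (by omega)]
      refine ⟨n / d, ⟨by omega, by omega⟩, ?_⟩
      have hz : (PySem.Int.mod n (n / d) == 0) = true := by
        simp [beq_iff_eq, PySem.Int.mod_eq_zero_iff_dvd]; exact hqdvd
      have hfd : PySem.Int.floordiv n (n / d) = n / (n / d) :=
        PySem.Int.floordiv_eq_ediv_of_pos (by omega)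
      simp only [hz, if_true, hfd, hback]
      split_ifs with hne
      · simp
      · simp at hne
        simp [hne]

-- on a weakly increasing list, find? returns a minimal satisfying element
theorem pv_find?_min {L : List Int} (hL : L.Pairwise (· ≤ ·)) {pred : Int → Bool} {a : Int}
    (h : L.find? pred = some a) : ∀ b ∈ L, pred b = true → a ≤ b := by
  induction L with
  | nil => simp at h
  | cons hd tl ih =>
    rw [List.find?_cons] at h
    rcases List.pairwise_cons.mp hL with ⟨hhd, htl⟩
    intro b hb hpb
    by_cases hp : pred hd
    · simp [hp] at h
      subst h
      rcases List.mem_cons.mp hb with hb | hb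
      · omega
      · exact hhd b hb
    · simp [hp] at h
      rcases List.mem_cons.mp hb with hb | hb
      · subst hb; simp [hpb] at hp
      · exact ih htl h b hb hpb

-- if B's loop misses, no progression point in [d, x] divides n
theorem pv_altLoop_none {n m x : Int} (hm : 0 < m) :
    ∀ d, altLoop n m x d = none →
    ∀ b, d ≤ b → b ≤ x → m ∣ b - d → ¬ b ∣ n := by
  have H : ∀ k : Nat, ∀ d, (x + 1 - d).toNat = k → altLoop n m x d = none →
      ∀ b, d ≤ b → b ≤ x → m ∣ b - d → ¬ b ∣ n := by
    intro k
    induction k using Nat.strong_induction_on with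
    | _ k ih =>
      intro d hk h b hdb hbx hdvd hbn
      rw [altLoop, dif_pos hm] at h
      have hdx : d ≤ x := by omega
      rw [dif_pos hdx] at h
      by_cases hz : PySem.Int.mod n d == 0
      · simp [hz] at h
      · simp [hz] at h
        rcases hdvd with ⟨c, hc⟩
        by_cases hbd : b = d
        · subst hbd
          exact hz (by simp [beq_iff_eq, PySem.Int.mod_eq_zero_iff_dvd]; exact hbn)
        · have hc1 : 1 ≤ c := by
            by_contra hcle
            have : m * c ≤ m * 0 := by
              apply mul_le_mul_of_nonneg_left (by omega) (by omega)
            omega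
          have hbm : d + m ≤ b := by
            have : m * 1 ≤ m * c := by
              apply mul_le_mul_of_nonneg_left (by omega) (by omega)
            omega
          exact ih (x + 1 - (d + m)).toNat (by omega) (d + m) rfl h b hbm hbx
            ⟨c - 1, by ring_nf; omega⟩ hbn
  intro d
  exact H (x + 1 - d).toNat d rfl

-- if B's loop hits a, then a is the least progression point in [d, x] dividing n
theorem pv_altLoop_some {n m x : Int} (hm : 0 < m) :
    ∀ d a, altLoop n m x d = some a →
    d ≤ a ∧ a ≤ x ∧ m ∣ a - d ∧ a ∣ n ∧
      ∀ b, d ≤ b → b < a → m ∣ b - d → ¬ b ∣ n := by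
  have H : ∀ k : Nat, ∀ d, (x + 1 - d).toNat = k → ∀ a, altLoop n m x d = some a →
      d ≤ a ∧ a ≤ x ∧ m ∣ a - d ∧ a ∣ n ∧
      ∀ b, d ≤ b → b < a → m ∣ b - d → ¬ b ∣ n := by
    intro k
    induction k using Nat.strong_induction_on with
    | _ k ih =>
      intro d hk a h
      rw [altLoop, dif_pos hm] at h
      by_cases hdx : d ≤ x
      · rw [dif_pos hdx] at h
        by_cases hz : PySem.Int.mod n d == 0
        · simp [hz] at h
          subst h
          refine ⟨le_refl _, hdx, ⟨0, by ring⟩, ?_, ?_⟩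
          · exact (PySem.Int.mod_eq_zero_iff_dvd n d).mp (by simpa using hz)
          · intro b hdb hba; omega
        · simp [hz] at h
          obtain ⟨h1, h2, h3, h4, h5⟩ :=
            ih (x + 1 - (d + m)).toNat (by omega) (d + m) rfl a h
          refine ⟨by omega, h2, ?_, h4, ?_⟩
          · rcases h3 with ⟨c, hc⟩; exact ⟨c + 1, by ring_nf; omega⟩
          · intro b hdb hba hdvd hbn
            rcases hdvd with ⟨c, hc⟩
            by_cases hbd : b = d
            · subst hbd
              exact hz (by simp [beq_iff_eq, PySem.Int.mod_eq_zero_iff_dvd]; exact hbn)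
            · have hc1 : 1 ≤ c := by
                by_contra hcle
                have : m * c ≤ m * 0 := by
                  apply mul_le_mul_of_nonneg_left (by omega) (by omega)
                omega
              have hbm : d + m ≤ b := by
                have : m * 1 ≤ m * c := by
                  apply mul_le_mul_of_nonneg_left (by omega) (by omega)
                omega
              exact h5 b hbm hba ⟨c - 1, by ring_nf; omega⟩ hbn
      · rw [dif_neg hdx] at h; simp at h
  intro d
  exact H (x + 1 - d).toNat d rfl

-- the two ports agree on every input
theorem pv_main (p x : Int) : check_type_ii p x = check_type_ii_alt p x := by
  unfold check_type_ii check_type_ii_alt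
  by_cases hm : 4 * x - p ≤ 0
  · simp [hm]
  · simp only [if_neg hm]
    have hm0 : 0 < 4 * x - p := by omega
    set m := 4 * x - p with hmdef
    set t := PySem.Int.mod (-x) m with htdef
    have htmod : t = (-x) % m := PySem.Int.mod_eq_emod_of_pos hm0
    have ht0 : 0 ≤ t := by rw [htmod]; exact Int.emod_nonneg _ (by omega)
    have htm : t < m := by rw [htmod]; exact Int.emod_lt_of_pos _ hm0
    set d0 : Int := if 1 ≤ t then t else t + m with hd0def
    have hd01 : 1 ≤ d0 := by rw [hd0def]; split_ifs <;> omega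
    have hd0m : d0 % m = t := by
      rw [hd0def]; split_ifs with h1
      · exact Int.emod_eq_of_lt ht0 htm
      · have ht : t = 0 := by omega
        simp [ht]
    have hd0le : d0 ≤ m := by rw [hd0def]; split_ifs <;> omega
    have hres : ∀ b : Int, 1 ≤ b → (b % m = t ↔ (m ∣ b - d0 ∧ d0 ≤ b)) := by
      intro b hb
      constructor
      · intro hbm
        have hmeq : Int.ModEq m d0 b := hd0m.trans hbm.symm
        have hdvd : m ∣ b - d0 := Int.modEq_iff_dvd.mp hmeq
        refine ⟨hdvd, ?_⟩
        obtain ⟨k, hk⟩ := hdvd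
        by_contra hlt
        have hk0 : k < 0 := by
          by_contra hk0
          have := mul_nonneg (le_of_lt hm0) (show (0:Int) ≤ k by omega)
          omega
        have : m * k ≤ m * (-1) := mul_le_mul_of_nonneg_left (by omega) (by omega)
        omega
      · rintro ⟨⟨k, hk⟩, hle⟩
        have hb' : b = d0 + m * k := by omega
        rw [hb', Int.add_mul_emod_self_left, hd0m]
    by_cases hx : x = 0
    · subst hx
      have hA : get_divisors (0 * 0) = [] := rfl
      have hB : altLoop (0 * 0) m 0 d0 = none := by
        rw [altLoop, dif_pos hm0, dif_neg (show ¬ d0 ≤ (0:Int) by omega)]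
      rw [hA, hB]
      rfl
    · have hn : 1 ≤ x * x := mul_self_pos.mpr hx
      set n := x * x with hndef
      have hpred : ∀ b : Int, ((decide (b ≤ x) && (PySem.Int.mod b m == t)) = true)
          ↔ (b ≤ x ∧ b % m = t) := by
        intro b
        simp [PySem.Int.mod_eq_emod_of_pos hm0]
      cases hA : (get_divisors n).find? (fun d => decide (d ≤ x) && (PySem.Int.mod d m == t)) with
      | none =>
        cases hB : altLoop n m x d0 with
        | none => rfl
        | some a =>
          exfalso
          obtain ⟨h1, h2, h3, h4, _⟩ := pv_altLoop_some hm0 d0 a hB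
          have ha1 : 1 ≤ a := by omega
          have hamem : a ∈ get_divisors n := (pv_mem_get_divisors hn a).mpr ⟨ha1, h4⟩
          have := List.find?_eq_none.mp hA a hamem
          exact this ((hpred a).mpr ⟨h2, (hres a ha1).mpr ⟨h3, h1⟩⟩)
      | some a =>
        have hamem : a ∈ get_divisors n := List.mem_of_find?_eq_some hA
        obtain ⟨ha1, hadvd⟩ := (pv_mem_get_divisors hn a).mp hamem
        obtain ⟨hax, hamod⟩ := (hpred a).mp (by simpa using List.find?_some hA)
        obtain ⟨hadvd0, had0⟩ := (hres a ha1).mp hamod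
        cases hB : altLoop n m x d0 with
        | none =>
          exfalso
          exact pv_altLoop_none hm0 d0 hB a had0 hax hadvd0 hadvd
        | some a' =>
          obtain ⟨h1, h2, h3, h4, h5⟩ := pv_altLoop_some hm0 d0 a' hB
          have ha'1 : 1 ≤ a' := by omega
          have ha'mem : a' ∈ get_divisors n := (pv_mem_get_divisors hn a').mpr ⟨ha'1, h4⟩
          have haa' : a ≤ a' := by
            apply pv_find?_min (pv_get_divisors_pairwise n) hA a' ha'mem
            exact (hpred a').mpr ⟨h2, (hres a' ha'1).mpr ⟨h3, h1⟩⟩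
          have ha'a : ¬ a < a' := fun hlt => h5 a had0 hlt hadvd0 hadvd
          have : a = a' := by omega
          rw [this]

-- ===== VERDICT (by name: the statement is the Claim_ definition above) =====
theorem check_type_ii_spec : Claim_equal_check_type_ii := by
  intro p x _
  unfold Spec_check_type_ii
  exact pv_main p x
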